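-- pv_equiv track=rewrite | github.com/NESHGP04/Lab10-IA | task3_3.py | hay_colapso_real
-- ===== SOURCE A (Python) =====
-- def hay_colapso_real(alertas, min_consecutivos=5):
--     contador = 0
--
--     for a in alertas:
--         if a:
--             contador += 1
--             if contador >= min_consecutivos:
--                 return True
--         else:
--             contador = 0
--
--     return False
-- ===== SOURCE B (Python) =====
-- def hay_colapso_real(alertas, min_consecutivos=5):
--     # Phase 1: group the sequence into maximal runs of equal truthiness.
--     runs = []
--     for a in alertas:
--         k = bool(a)
--         if runs and runs[-1][0] == k:
--             runs[-1][1] += 1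
--         else:
--             runs.append([k, 1])
--     # Phase 2: collapse iff some truthy run is long enough.
--     return any(k and n >= min_consecutivos for k, n in runs)
-- ===== Notes on version B (the rewrite author's own statement) =====
-- stated objective: alternative
-- what changed: Replaces A's single-pass counter with early return by a two-phase run-length encoding: build the list of maximal runs of equal truthiness, then check with any() whether some true run reaches min_consecutivos.
import Mathlib
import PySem

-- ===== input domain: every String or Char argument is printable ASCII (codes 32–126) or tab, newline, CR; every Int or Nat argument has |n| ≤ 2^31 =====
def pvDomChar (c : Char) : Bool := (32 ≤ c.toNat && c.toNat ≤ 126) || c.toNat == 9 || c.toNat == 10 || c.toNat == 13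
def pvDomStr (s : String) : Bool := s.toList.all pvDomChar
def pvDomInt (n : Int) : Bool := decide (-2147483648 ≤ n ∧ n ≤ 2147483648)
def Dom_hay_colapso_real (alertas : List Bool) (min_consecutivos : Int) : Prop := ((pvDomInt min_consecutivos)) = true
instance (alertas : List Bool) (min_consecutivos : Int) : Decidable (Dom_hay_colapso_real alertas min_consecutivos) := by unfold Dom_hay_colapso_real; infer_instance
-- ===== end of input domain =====

-- B replaces A's single-pass counter with early return by a two-phase run-length
-- encoding (build maximal runs, then check them); alternative decomposition, same cost.


-- ===== PORT A =====
-- A's loop: counter over the list, early return True once contador ≥ min_consecutivos.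
def hayColapsoLoopA (alertas : List Bool) (min_consecutivos : Int) (contador : Int) : Bool :=
  match alertas with
  | [] => false
  | a :: rest =>
    if a then
      if contador + 1 ≥ min_consecutivos then true
      else hayColapsoLoopA rest min_consecutivos (contador + 1)
    else hayColapsoLoopA rest min_consecutivos 0

def hay_colapso_real (alertas : List Bool) (min_consecutivos : Int) : Bool :=
  hayColapsoLoopA alertas min_consecutivos 0

-- ===== PORT B =====
-- Run-length encode into maximal runs of equal truthiness (same list B's Python builds
-- left-to-right; here built by recursion on the front, merging into the head run).
def pvRuns (alertas : List Bool) : List (Bool × Nat) :=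
  match alertas with
  | [] => []
  | a :: rest =>
    match pvRuns rest with
    | (k, n) :: t => if a == k then (k, n + 1) :: t else (a, 1) :: (k, n) :: t
    | [] => [(a, 1)]

def hay_colapso_real_alt (alertas : List Bool) (min_consecutivos : Int) : Bool :=
  (pvRuns alertas).any (fun p => p.1 && decide ((p.2 : Int) ≥ min_consecutivos))

-- ===== PRECONDITION & SPEC =====
def Spec_hay_colapso_real (alertas : List Bool) (min_consecutivos : Int) (out : Bool) : Prop := out = hay_colapso_real_alt alertas min_consecutivos
instance (alertas : List Bool) (min_consecutivos : Int) (out : Bool) : Decidable (Spec_hay_colapso_real alertas min_consecutivos out) := by unfold Spec_hay_colapso_real; infer_instance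

-- ===== CLAIM (what is proved, stated in full; the proofs are below) =====
def Claim_equal_hay_colapso_real : Prop := ∀ (alertas : List Bool) (min_consecutivos : Int), Dom_hay_colapso_real alertas min_consecutivos → Spec_hay_colapso_real alertas min_consecutivos (hay_colapso_real alertas min_consecutivos)

-- ===== LEMMAS AND PROOFS =====

-- B's check, but with the first run, when true, credited with an extra `c` (A's counter).
def pvAltC (m c : Int) (l : List Bool) : Bool :=
  match pvRuns l with
  | (true, n) :: t => decide (c + (n : Int) ≥ m) || t.any (fun p => p.1 && decide ((p.2 : Int) ≥ m))
  | rs => rs.any (fun p => p.1 && decide ((p.2 : Int) ≥ m))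

theorem pvAltC_zero (m : Int) (l : List Bool) :
    pvAltC m 0 l = hay_colapso_real_alt l m := by
  unfold pvAltC hay_colapso_real_alt
  rcases h : pvRuns l with _ | ⟨⟨k, n⟩, t⟩
  · rfl
  · cases k <;> simp [List.any_cons]

theorem loopA_eq_altC (l : List Bool) (m c : Int) :
    hayColapsoLoopA l m c = pvAltC m c l := by
  induction l generalizing c with
  | nil => rfl
  | cons a rest ih =>
    cases a with
    | false =>
      rw [show hayColapsoLoopA (false :: rest) m c = hayColapsoLoopA rest m 0 from rfl, ih]
      rcases h : pvRuns rest with _ | ⟨⟨k, n⟩, t⟩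
      · simp [pvAltC, pvRuns, h]
      · cases k
        · simp [pvAltC, pvRuns, h, List.any_cons]
        · simp [pvAltC, pvRuns, h, List.any_cons]
    | true =>
      rw [show hayColapsoLoopA (true :: rest) m c
            = (if c + 1 ≥ m then true else hayColapsoLoopA rest m (c + 1)) from rfl, ih]
      rcases h : pvRuns rest with _ | ⟨⟨k, n⟩, t⟩
      · -- rest has no runs, hence rest = []
        have hrest : rest = [] := by
          cases rest with
          | nil => rfl
          | cons b rb =>
            exfalso; revert h
            unfold pvRuns
            rcases pvRuns rb with _ | ⟨⟨k', n'⟩, t'⟩ <;> simp <;> split <;> simp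
        subst hrest
        simp [pvAltC, pvRuns]
      · cases k with
        | true =>
          simp only [pvAltC, pvRuns, h, beq_self_eq_true, if_true]
          rcases Decidable.em (c + 1 ≥ m) with h1 | h1
          · have h2 : c + ((n : Int) + 1) ≥ m := by
              have := Int.natCast_nonneg n; omega
            push_cast
            simp [h1, h2]
          · have he : c + 1 + (n : Int) = c + ((n : Int) + 1) := by ring
            push_cast
            simp [h1, he]
        | false =>
          simp only [pvAltC, pvRuns, h]
          split <;> simp_all [List.any_cons]

-- ===== VERDICT (by name: the statement is the Claim_ definition above) =====
theorem hay_colapso_real_spec : Claim_equal_hay_colapso_real := by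
  intro alertas m _
  unfold Spec_hay_colapso_real hay_colapso_real
  rw [loopA_eq_altC, pvAltC_zero]
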